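-- pv_equiv track=rewrite | github.com/Deven-puri/Dynamic-Query-retrival-Model | ROUND_6/almost_equal_pattern.py | almost_equal_index
-- ===== SOURCE A (Python) =====
-- def almost_equal_index(s, pattern):
--     n = len(s)
--     m = len(pattern)
--     for i in range(n - m + 1):
--         substring = s[i:i + m]
--         # Count the number of different characters
--         differences = sum(1 for a, b in zip(substring, pattern) if a != b)
--         if differences <= 1:
--             return i
--     return -1
-- ===== SOURCE B (Python) =====
-- def almost_equal_index(s, pattern):
--     n = len(s)
--     m = len(pattern)
--     for i in range(n - m + 1):
--         # scan to the first mismatch instead of counting all mismatches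
--         j = 0
--         while j < m and s[i + j] == pattern[j]:
--             j += 1
--         if j == m:
--             return i
--         # one mismatch spent at j; the rest must match exactly
--         if s[i + j + 1:i + m] == pattern[j + 1:]:
--             return i
--     return -1
-- ===== Notes on version B (the rewrite author's own statement) =====
-- stated objective: faster
-- what changed: Per alignment, A counts all mismatches over the zipped window; B scans only to the first mismatch and then checks the two tails for exact equality, short-circuiting instead of counting.
import Mathlib
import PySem

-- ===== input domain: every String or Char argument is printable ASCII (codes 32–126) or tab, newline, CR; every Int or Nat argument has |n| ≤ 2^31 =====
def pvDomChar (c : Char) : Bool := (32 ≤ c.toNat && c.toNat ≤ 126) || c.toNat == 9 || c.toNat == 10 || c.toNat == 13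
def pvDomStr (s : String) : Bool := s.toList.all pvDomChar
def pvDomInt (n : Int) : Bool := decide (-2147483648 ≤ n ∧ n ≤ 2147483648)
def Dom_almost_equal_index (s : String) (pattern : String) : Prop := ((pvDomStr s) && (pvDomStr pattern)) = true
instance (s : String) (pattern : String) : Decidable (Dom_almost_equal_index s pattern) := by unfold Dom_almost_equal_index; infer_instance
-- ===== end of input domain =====

-- B replaces A's per-alignment full mismatch count (sum over the zipped window) by an
-- early-exit scan to the first mismatch followed by an exact tail comparison (objective: alternative).

-- ===== PORT A =====
-- sum(1 for a, b in zip(substring, pattern) if a != b)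
def pvCountDiff (w p : List Char) : Int :=
  ((w.zip p).map (fun ab => if ab.1 ≠ ab.2 then (1 : Int) else 0)).sum

-- for i in range(n - m + 1): …
def pvALoop (sl pl : List Char) (m : Int) : List Int → Int
  | [] => -1
  | i :: rest =>
      if pvCountDiff (PySem.List.slice sl (some i) (some (i + m))) pl ≤ 1 then i
      else pvALoop sl pl m rest

def almost_equal_index (s : String) (pattern : String) : Int :=
  let sl := s.toList
  let pl := pattern.toList
  let n : Int := sl.length
  let m : Int := pl.length
  pvALoop sl pl m (PySem.List.pyRange 0 (n - m + 1) 1)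

-- ===== PORT B =====
-- while j < m and s[i + j] == pattern[j]: j += 1
def pvBScan (sl pl : List Char) (i m : Int) (j : Int) : Int :=
  if h : j < m ∧ PySem.List.pyGet? sl (i + j) = PySem.List.pyGet? pl j then
    pvBScan sl pl i m (j + 1)
  else j
termination_by (m - j).toNat
decreasing_by omega

-- for i in range(n - m + 1): scan; if j == m: return i; if s[i+j+1:i+m] == pattern[j+1:]: return i
def pvBLoop (sl pl : List Char) (m : Int) : List Int → Int
  | [] => -1
  | i :: rest =>
      let j := pvBScan sl pl i m 0
      if j = m then i
      else if PySem.List.slice sl (some (i + j + 1)) (some (i + m)) =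
              PySem.List.slice pl (some (j + 1)) none then i
      else pvBLoop sl pl m rest

def almost_equal_index_alt (s : String) (pattern : String) : Int :=
  let sl := s.toList
  let pl := pattern.toList
  let n : Int := sl.length
  let m : Int := pl.length
  pvBLoop sl pl m (PySem.List.pyRange 0 (n - m + 1) 1)

-- ===== PRECONDITION & SPEC =====
def Spec_almost_equal_index (s : String) (pattern : String) (out : Int) : Prop := out = almost_equal_index_alt s pattern
instance (s : String) (pattern : String) (out : Int) : Decidable (Spec_almost_equal_index s pattern out) := by unfold Spec_almost_equal_index; infer_instance

-- ===== CLAIM (what is proved, stated in full; the proofs are below) =====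
def Claim_equal_almost_equal_index : Prop := ∀ (s : String) (pattern : String), Dom_almost_equal_index s pattern → Spec_almost_equal_index s pattern (almost_equal_index s pattern)

-- ===== LEMMAS AND PROOFS =====

-- number of mismatching positions, recursively
def pvMism : List Char → List Char → Nat
  | a :: as, b :: bs => (if a ≠ b then 1 else 0) + pvMism as bs
  | _, _ => 0

-- length of the longest common prefix, recursively
def pvLcp : List Char → List Char → Nat
  | a :: as, b :: bs => if a = b then pvLcp as bs + 1 else 0
  | _, _ => 0

theorem pvCountDiff_eq_mism (w p : List Char) : pvCountDiff w p = (pvMism w p : Int) := by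
  induction w generalizing p with
  | nil => cases p <;> simp [pvCountDiff, pvMism]
  | cons a as ih =>
      cases p with
      | nil => simp [pvCountDiff, pvMism]
      | cons b bs =>
          have := ih bs
          simp [pvCountDiff, pvMism] at this ⊢
          simp [this]

theorem pvMism_eq_zero_iff (w p : List Char) (h : w.length = p.length) :
    pvMism w p = 0 ↔ w = p := by
  induction w generalizing p with
  | nil => cases p <;> simp_all [pvMism]
  | cons a as ih =>
      cases p with
      | nil => simp at h
      | cons b bs =>
          simp only [List.length_cons, Nat.add_right_cancel_iff] at h
          by_cases hab : a = b <;> simp [pvMism, hab, ih bs h]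

-- core list fact: "≤ 1 mismatch" = "match up to first mismatch, then equal tails"
theorem pvMism_le_one_iff (w p : List Char) (h : w.length = p.length) :
    pvMism w p ≤ 1 ↔ (pvLcp w p = p.length ∨ w.drop (pvLcp w p + 1) = p.drop (pvLcp w p + 1)) := by
  induction w generalizing p with
  | nil => cases p <;> simp_all [pvMism, pvLcp]
  | cons a as ih =>
      cases p with
      | nil => simp at h
      | cons b bs =>
          simp only [List.length_cons, Nat.add_right_cancel_iff] at h
          by_cases hab : a = b
          · simpa [pvMism, pvLcp, hab] using ih bs h
          · rw [show pvMism (a :: as) (b :: bs) = 1 + pvMism as bs by simp [pvMism, hab],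
                show pvLcp (a :: as) (b :: bs) = 0 by simp [pvLcp, hab]]
            simp only [List.length_cons, Nat.zero_add, List.drop_succ_cons, List.drop_zero]
            constructor
            · intro hle
              right
              exact (pvMism_eq_zero_iff as bs h).mp (by omega)
            · rintro (h0 | he)
              · omega
              · have := (pvMism_eq_zero_iff as bs h).mpr he
                omega

-- pvBScan computes j + lcp of the tails of the window and the pattern
theorem pvBScan_eq (sl pl : List Char) (i : Int) (hi : 0 ≤ i)
    (hn : i + (pl.length : Int) ≤ (sl.length : Int)) :
    ∀ (d : Nat) (j : Int), 0 ≤ j → j ≤ (pl.length : Int) → ((pl.length : Int) - j).toNat = d →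
      pvBScan sl pl i (pl.length : Int) j =
        j + (pvLcp (((sl.drop i.toNat).take pl.length).drop j.toNat) (pl.drop j.toNat) : Int) := by
  intro d
  induction d with
  | zero =>
      intro j hj0 hjm hd
      have hjm' : j = (pl.length : Int) := by omega
      rw [pvBScan]
      have : ¬ (j < (pl.length : Int) ∧
          PySem.List.pyGet? sl (i + j) = PySem.List.pyGet? pl j) := by
        intro ⟨h1, _⟩; omega
      rw [dif_neg this]
      have hlen : (((sl.drop i.toNat).take pl.length).drop j.toNat) = [] := by
        apply List.drop_eq_nil_of_le
        simp [List.length_take, List.length_drop]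
        omega
      rw [hlen]
      simp [pvLcp, hjm']
  | succ d ih =>
      intro j hj0 hjm hd
      have hjlt : j < (pl.length : Int) := by omega
      have hjn : j.toNat < pl.length := by omega
      have hin : (i + j).toNat < sl.length := by omega
      have hwlen : ((sl.drop i.toNat).take pl.length).length = pl.length := by
        simp [List.length_take, List.length_drop]; omega
      have hjw : j.toNat < ((sl.drop i.toNat).take pl.length).length := by omega
      -- expose the heads of the two dropped tails
      have hdw : ((sl.drop i.toNat).take pl.length).drop j.toNat =
          ((sl.drop i.toNat).take pl.length)[j.toNat] ::
            ((sl.drop i.toNat).take pl.length).drop (j.toNat + 1) :=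
        List.drop_eq_getElem_cons hjw
      have hdp : pl.drop j.toNat = pl[j.toNat] :: pl.drop (j.toNat + 1) :=
        List.drop_eq_getElem_cons hjn
      have hwj : ((sl.drop i.toNat).take pl.length)[j.toNat] = sl[(i + j).toNat] := by
        rw [List.getElem_take, List.getElem_drop]
        congr 1; omega
      have hga : PySem.List.pyGet? sl (i + j) = sl[(i + j).toNat]? :=
        PySem.List.pyGet?_of_nonneg sl (by omega)
      have hgb : PySem.List.pyGet? pl j = pl[j.toNat]? :=
        PySem.List.pyGet?_of_nonneg pl hj0
      rw [pvBScan]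
      by_cases hc : sl[(i + j).toNat] = pl[j.toNat]
      · rw [dif_pos ⟨hjlt, by rw [hga, hgb, List.getElem?_eq_getElem hin,
          List.getElem?_eq_getElem hjn, hc]⟩]
        rw [ih (j + 1) (by omega) (by omega) (by omega)]
        rw [hdw, hdp, pvLcp]
        rw [hwj, if_pos hc]
        have : (j + 1).toNat = j.toNat + 1 := by omega
        rw [this]
        push_cast
        ring
      · rw [dif_neg (by
          intro ⟨_, heq⟩
          rw [hga, hgb, List.getElem?_eq_getElem hin, List.getElem?_eq_getElem hjn] at heq
          exact hc (Option.some.injEq _ _ ▸ heq))]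
        rw [hdw, hdp, pvLcp, hwj, if_neg hc]
        simp

-- per-alignment equivalence of A's test and B's test
theorem pvTest_iff (sl pl : List Char) (i : Int) (hi : 0 ≤ i)
    (hn : i + (pl.length : Int) ≤ (sl.length : Int)) :
    (pvCountDiff (PySem.List.slice sl (some i) (some (i + (pl.length : Int)))) pl ≤ 1) ↔
      (pvBScan sl pl i (pl.length : Int) 0 = (pl.length : Int) ∨
        PySem.List.slice sl (some (i + pvBScan sl pl i (pl.length : Int) 0 + 1))
            (some (i + (pl.length : Int))) =
          PySem.List.slice pl (some (pvBScan sl pl i (pl.length : Int) 0 + 1)) none) := by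
  set w : List Char := (sl.drop i.toNat).take pl.length with hw
  have hslice : PySem.List.slice sl (some i) (some (i + (pl.length : Int))) = w := by
    rw [PySem.List.slice_toNat sl hi (by omega : (0:Int) ≤ i + (pl.length : Int))]
    congr 1; omega
  have hwlen : w.length = pl.length := by
    simp [hw, List.length_take, List.length_drop]; omega
  have hscan : pvBScan sl pl i (pl.length : Int) 0 = (pvLcp w pl : Int) := by
    simpa using pvBScan_eq sl pl i hi hn ((pl.length : Int) - 0).toNat 0 le_rfl
      (by omega) rfl
  set k : Nat := pvLcp w pl with hk
  rw [hslice, hscan, pvCountDiff_eq_mism]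
  have hmain := pvMism_le_one_iff w pl hwlen
  constructor
  · intro hle
    rcases hmain.mp (by exact_mod_cast hle) with h1 | h2
    · left; exact_mod_cast h1
    · right
      have h1 : i + (k : Int) + 1 = ((i.toNat + k + 1 : Nat) : Int) := by push_cast; omega
      have h2' : i + (pl.length : Int) = ((i.toNat + pl.length : Nat) : Int) := by push_cast; omega
      have h3 : (k : Int) + 1 = (((k + 1 : Nat)) : Int) := by push_cast; ring
      rw [h1, h2', h3, PySem.List.slice_natCast, PySem.List.slice_from_natCast]
      have hwd : w.drop (k + 1) = (sl.drop (i.toNat + k + 1)).take (pl.length - (k + 1)) := by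
        rw [hw, List.drop_take, List.drop_drop]
        rfl
      rw [hwd] at h2
      have harith : (i.toNat + pl.length) - (i.toNat + k + 1) = pl.length - (k + 1) := by omega
      rw [harith]
      exact h2
  · intro hor
    apply (by exact_mod_cast hmain.mpr :
      (k = pl.length ∨ w.drop (k + 1) = pl.drop (k + 1)) → (pvMism w pl : Int) ≤ 1)
    rcases hor with h1 | h2
    · left; exact_mod_cast h1
    · right
      have h1 : i + (k : Int) + 1 = ((i.toNat + k + 1 : Nat) : Int) := by push_cast; omega
      have h2' : i + (pl.length : Int) = ((i.toNat + pl.length : Nat) : Int) := by push_cast; omega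
      have h3 : (k : Int) + 1 = (((k + 1 : Nat)) : Int) := by push_cast; ring
      rw [h1, h2', h3, PySem.List.slice_natCast, PySem.List.slice_from_natCast] at h2
      have hwd : w.drop (k + 1) = (sl.drop (i.toNat + k + 1)).take (pl.length - (k + 1)) := by
        rw [hw, List.drop_take, List.drop_drop]
        rfl
      rw [hwd]
      have harith : (i.toNat + pl.length) - (i.toNat + k + 1) = pl.length - (k + 1) := by omega
      rw [harith] at h2
      exact h2

-- the two sweeps agree index by index
theorem pvLoop_eq (sl pl : List Char) :
    ∀ (L : List Int), (∀ i ∈ L, 0 ≤ i ∧ i + (pl.length : Int) ≤ (sl.length : Int)) →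
      pvALoop sl pl (pl.length : Int) L = pvBLoop sl pl (pl.length : Int) L := by
  intro L
  induction L with
  | nil => intro _; rfl
  | cons i rest ih =>
      intro hmem
      obtain ⟨hi, hn⟩ := hmem i (List.mem_cons_self)
      have hiff := pvTest_iff sl pl i hi hn
      rw [pvALoop, pvBLoop]
      by_cases hA : pvCountDiff (PySem.List.slice sl (some i) (some (i + (pl.length : Int)))) pl ≤ 1
      · rw [if_pos hA]
        rcases hiff.mp hA with h1 | h2
        · simp [h1]
        · by_cases hj : pvBScan sl pl i (pl.length : Int) 0 = (pl.length : Int)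
          · simp [hj]
          · simp [hj, h2]
      · rw [if_neg hA]
        have hnor := (hiff.not.mp hA)
        rw [not_or] at hnor
        rw [if_neg hnor.1, if_neg hnor.2]
        exact ih (fun i hi => hmem i (List.mem_cons_of_mem _ hi))

-- ===== VERDICT (by name: the statement is the Claim_ definition above) =====
theorem almost_equal_index_spec : Claim_equal_almost_equal_index := by
  intro s pattern _
  unfold Spec_almost_equal_index almost_equal_index almost_equal_index_alt
  apply pvLoop_eq
  intro i hi
  rw [PySem.List.mem_pyRange_one] at hi
  omega
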